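-- pv_equiv track=rewrite | github.com/ziomciopoziomcio/Smart-University-Scheduler | ai_worker/optimizer/greedy.py | _is_instructor_ok
-- ===== SOURCE A (Python) =====
-- def _is_instructor_ok(
--     iid: int,
--     weeks: list[int],
--     start_slot: int,
--     duration: int,
--     occupied_instr: set[tuple[int, int, int]],
-- ) -> bool:
--     for w in weeks:
--         for s in range(start_slot, start_slot + duration):
--             if (w, s, iid) in occupied_instr:
--                 return False
--     return True
-- ===== SOURCE B (Python) =====
-- def _is_instructor_ok(
--     iid: int,
--     weeks: list[int],
--     start_slot: int,
--     duration: int,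
--     occupied_instr: set[tuple[int, int, int]],
-- ) -> bool:
--     # One pass over the occupied set instead of generating week x slot candidates:
--     # a conflict exists iff some occupied entry names this instructor, a requested
--     # week, and a slot inside [start_slot, start_slot + duration).
--     week_set = set(weeks)
--     return not any(
--         i == iid and w in week_set and start_slot <= s < start_slot + duration
--         for (w, s, i) in occupied_instr
--     )
-- ===== Notes on version B (the rewrite author's own statement) =====
-- stated objective: faster
-- what changed: B scans the occupied set once, testing each entry against iid, a set of the requested weeks and the slot interval, instead of A's nested generate-and-probe loop over weeks x slots (O(|weeks|*duration) probes).
import Mathlib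
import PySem

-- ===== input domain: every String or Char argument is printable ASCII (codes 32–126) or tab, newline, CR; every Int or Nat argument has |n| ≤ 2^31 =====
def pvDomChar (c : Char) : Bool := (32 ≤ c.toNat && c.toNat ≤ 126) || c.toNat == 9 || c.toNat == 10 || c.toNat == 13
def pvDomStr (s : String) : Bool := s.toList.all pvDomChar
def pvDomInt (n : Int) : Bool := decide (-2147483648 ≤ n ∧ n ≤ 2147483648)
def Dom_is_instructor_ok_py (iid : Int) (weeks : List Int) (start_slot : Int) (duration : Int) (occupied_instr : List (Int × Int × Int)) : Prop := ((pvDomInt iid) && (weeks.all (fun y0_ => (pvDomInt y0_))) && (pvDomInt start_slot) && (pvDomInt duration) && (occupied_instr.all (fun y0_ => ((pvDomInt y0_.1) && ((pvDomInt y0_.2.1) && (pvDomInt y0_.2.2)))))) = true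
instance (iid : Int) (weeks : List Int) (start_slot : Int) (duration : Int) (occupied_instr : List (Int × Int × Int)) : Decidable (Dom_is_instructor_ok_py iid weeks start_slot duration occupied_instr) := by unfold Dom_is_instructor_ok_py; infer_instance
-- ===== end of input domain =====

-- B replaces A's nested weeks×slots generate-and-probe loop by a single pass over
-- the occupied set, testing each entry against iid, a set of the weeks and the
-- slot interval (objective: alternative).

-- ===== PORT A =====
-- inner 'for s in range(start_slot, start_slot + duration)' with early return False
def aSlotLoop (iid w : Int) (occ : List (Int × Int × Int)) : List Int → Bool
  | [] => true
  | s :: rest => if occ.contains (w, s, iid) then false else aSlotLoop iid w occ rest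

-- outer 'for w in weeks' with early return False
def aWeekLoop (iid start_slot duration : Int) (occ : List (Int × Int × Int)) : List Int → Bool
  | [] => true
  | w :: rest =>
      if aSlotLoop iid w occ (PySem.List.pyRange start_slot (start_slot + duration) 1) then
        aWeekLoop iid start_slot duration occ rest
      else false

def is_instructor_ok_py (iid : Int) (weeks : List Int) (start_slot : Int) (duration : Int) (occupied_instr : List (Int × Int × Int)) : Bool :=
  aWeekLoop iid start_slot duration occupied_instr weeks

-- ===== PORT B =====
def is_instructor_ok_py_alt (iid : Int) (weeks : List Int) (start_slot : Int) (duration : Int) (occupied_instr : List (Int × Int × Int)) : Bool :=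
  let week_set : PySem.Set Int := PySem.Set.ofList weeks
  ! occupied_instr.any (fun t =>
      t.2.2 == iid && PySem.Set.contains week_set t.1 &&
      decide (start_slot ≤ t.2.1) && decide (t.2.1 < start_slot + duration))

-- ===== PRECONDITION & SPEC =====
def Spec_is_instructor_ok_py (iid : Int) (weeks : List Int) (start_slot : Int) (duration : Int) (occupied_instr : List (Int × Int × Int)) (out : Bool) : Prop := out = is_instructor_ok_py_alt iid weeks start_slot duration occupied_instr
instance (iid : Int) (weeks : List Int) (start_slot : Int) (duration : Int) (occupied_instr : List (Int × Int × Int)) (out : Bool) : Decidable (Spec_is_instructor_ok_py iid weeks start_slot duration occupied_instr out) := by unfold Spec_is_instructor_ok_py; infer_instance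

-- ===== CLAIM (what is proved, stated in full; the proofs are below) =====
def Claim_equal_is_instructor_ok_py : Prop := ∀ (iid : Int) (weeks : List Int) (start_slot : Int) (duration : Int) (occupied_instr : List (Int × Int × Int)), Dom_is_instructor_ok_py iid weeks start_slot duration occupied_instr → Spec_is_instructor_ok_py iid weeks start_slot duration occupied_instr (is_instructor_ok_py iid weeks start_slot duration occupied_instr)

-- ===== LEMMAS AND PROOFS =====

theorem aSlotLoop_eq_true (iid w : Int) (occ : List (Int × Int × Int)) (slots : List Int) :
    aSlotLoop iid w occ slots = true ↔ ∀ s ∈ slots, (w, s, iid) ∉ occ := by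
  induction slots with
  | nil => simp [aSlotLoop]
  | cons s rest ih => by_cases h : (w, s, iid) ∈ occ <;> simp [aSlotLoop, h, ih]

theorem aWeekLoop_eq_true (iid start_slot duration : Int) (occ : List (Int × Int × Int)) (weeks : List Int) :
    aWeekLoop iid start_slot duration occ weeks = true ↔
      ∀ w ∈ weeks, ∀ s, start_slot ≤ s → s < start_slot + duration → (w, s, iid) ∉ occ := by
  induction weeks with
  | nil => simp [aWeekLoop]
  | cons w rest ih =>
      have hsplit : aWeekLoop iid start_slot duration occ (w :: rest) =
          (aSlotLoop iid w occ (PySem.List.pyRange start_slot (start_slot + duration) 1) &&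
           aWeekLoop iid start_slot duration occ rest) := by
        simp only [aWeekLoop]
        by_cases h : aSlotLoop iid w occ (PySem.List.pyRange start_slot (start_slot + duration) 1) = true <;>
          simp [h]
      rw [hsplit, Bool.and_eq_true, aSlotLoop_eq_true, ih, List.forall_mem_cons]
      refine and_congr ?_ Iff.rfl
      constructor
      · intro h s h1 h2
        exact h s (PySem.List.mem_pyRange_one.mpr ⟨h1, h2⟩)
      · intro h s hs
        obtain ⟨h1, h2⟩ := PySem.List.mem_pyRange_one.mp hs
        exact h s h1 h2

theorem alt_eq_true (iid : Int) (weeks : List Int) (start_slot duration : Int) (occ : List (Int × Int × Int)) :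
    is_instructor_ok_py_alt iid weeks start_slot duration occ = true ↔
      ∀ w ∈ weeks, ∀ s, start_slot ≤ s → s < start_slot + duration → (w, s, iid) ∉ occ := by
  simp only [is_instructor_ok_py_alt, Bool.not_eq_true', List.any_eq_false, Bool.and_eq_true,
    beq_iff_eq, decide_eq_true_eq, PySem.Set.contains, List.contains_eq_mem, PySem.Set.mem_ofList,
    not_and]
  constructor
  · intro h w hw s h1 h2 hmem
    exact h (w, s, iid) hmem ⟨⟨rfl, hw⟩, h1⟩ h2
  · rintro h ⟨w, s, i⟩ hmem ⟨⟨hi, hw⟩, h1⟩ h2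
    exact h w hw s h1 h2 (hi ▸ hmem)

-- ===== VERDICT (by name: the statement is the Claim_ definition above) =====
theorem is_instructor_ok_py_spec : Claim_equal_is_instructor_ok_py := by
  intro iid weeks start_slot duration occ _
  unfold Spec_is_instructor_ok_py is_instructor_ok_py
  rw [Bool.eq_iff_iff, aWeekLoop_eq_true, alt_eq_true]
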